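-- pv_equiv track=rewrite | github.com/longlong-zhang/micromagnetic-simulations | optimisation/generate_boilerplate.py | generate_gridspace
-- ===== SOURCE A (Python) =====
-- def generate_gridspace(x: int, y: int) -> str:
--     gridspace = []
--     for i in range(int(x/2)):
--         for j in range(int(y/2)):
--             gridspace += [', Cuboid(GridSize, GridSize, GridSize*3)' +
--                           '.transl(' + 'Translate*' + str(1 + 2*i) +
--                           ', Translate*' + str(1 + 2*j) + ', 0))\n']
--     gridspace += list(map(lambda x:
--                       x.replace('Translate', '-Translate', 1), gridspace))
--     gridspace += list(map(lambda x:
--                       '-Translate'.join(x.rsplit('Translate', 1)), gridspace))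
--     gridspace = ['DefRegion(' + str(i+1) + x for i, x in enumerate(gridspace)]
--     lines = ''.join(gridspace)
--     return lines
-- ===== SOURCE B (Python) =====
-- def generate_gridspace(x: int, y: int) -> str:
--     parts = []
--     n = 0
--     for sy in ('', '-'):
--         for sx in ('', '-'):
--             for i in range(int(x / 2)):
--                 for j in range(int(y / 2)):
--                     n += 1
--                     parts.append(
--                         f'DefRegion({n}, Cuboid(GridSize, GridSize, GridSize*3)'
--                         f'.transl({sx}Translate*{1 + 2 * i}, {sy}Translate*{1 + 2 * j}, 0))\n')
--     return ''.join(parts)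
-- ===== Notes on version B (the rewrite author's own statement) =====
-- stated objective: simpler
-- what changed: B drops A's build-one-quadrant-then-mirror-by-string-replacement (replace first 'Translate', then rsplit/join the last one, then a separate enumerate pass to prepend the region number): it emits every line directly in one pass of four nested loops over sign pairs and grid indices with a running region counter, with no replace/rsplit/enumerate passes at all.
import Mathlib
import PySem

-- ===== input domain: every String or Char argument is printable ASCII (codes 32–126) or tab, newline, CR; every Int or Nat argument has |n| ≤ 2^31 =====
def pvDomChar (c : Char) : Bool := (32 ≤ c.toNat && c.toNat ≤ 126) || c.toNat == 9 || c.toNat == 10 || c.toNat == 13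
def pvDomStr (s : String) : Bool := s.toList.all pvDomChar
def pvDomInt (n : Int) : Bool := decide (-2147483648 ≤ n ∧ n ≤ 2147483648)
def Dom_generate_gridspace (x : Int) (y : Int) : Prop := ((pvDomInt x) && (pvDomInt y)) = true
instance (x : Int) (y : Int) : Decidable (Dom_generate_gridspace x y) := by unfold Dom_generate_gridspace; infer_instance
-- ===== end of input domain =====

-- B replaces A's build-quadrant-then-mirror-by-string-replacement with one direct pass of
-- nested sign/index loops and a running region counter (objective: simpler; same return value).

-- ===== PORT A =====
-- hand port of s.replace(old, new, 1); exact for old ≠ '' (here old = 'Translate')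
def pvReplaceFirst : List Char → List Char → List Char → List Char
  | [], _, _ => []
  | c :: rest, old, new =>
    if old.isPrefixOf (c :: rest) then new ++ (c :: rest).drop old.length
    else c :: pvReplaceFirst rest old new

-- hand port of new.join(s.rsplit(old, 1)) = replace the LAST occurrence of old; exact for old ≠ ''
def pvReplaceLast : List Char → List Char → List Char → List Char
  | [], _, _ => []
  | c :: rest, old, new =>
    if PySem.Chars.isIn old rest then c :: pvReplaceLast rest old new
    else if old.isPrefixOf (c :: rest) then new ++ (c :: rest).drop old.length
    else c :: pvReplaceLast rest old new

def generate_gridspace (x : Int) (y : Int) : String :=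
  let g0 : List (List Char) :=
    (PySem.List.pyRange 0 (PySem.Int.truncdiv x 2)).foldl (fun acc i =>
      (PySem.List.pyRange 0 (PySem.Int.truncdiv y 2)).foldl (fun acc2 j =>
        acc2 ++ [", Cuboid(GridSize, GridSize, GridSize*3)".toList ++ ".transl(".toList ++
                 "Translate*".toList ++ PySem.Int.toChars (1 + 2*i) ++
                 ", Translate*".toList ++ PySem.Int.toChars (1 + 2*j) ++ ", 0))\n".toList]) acc) []
  let g1 := g0 ++ g0.map (fun s => pvReplaceFirst s "Translate".toList "-Translate".toList)
  let g2 := g1 ++ g1.map (fun s => pvReplaceLast s "Translate".toList "-Translate".toList)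
  let g3 := (PySem.List.enumerate g2).map
      (fun p => "DefRegion(".toList ++ PySem.Int.toChars (p.1 + 1) ++ p.2)
  String.ofList (PySem.Chars.join [] g3)

-- ===== PORT B =====
def generate_gridspace_alt (x : Int) (y : Int) : String :=
  let res :=
    [([] : List Char), "-".toList].foldl (fun st sy =>
      [([] : List Char), "-".toList].foldl (fun st sx =>
        (PySem.List.pyRange 0 (PySem.Int.truncdiv x 2)).foldl (fun st i =>
          (PySem.List.pyRange 0 (PySem.Int.truncdiv y 2)).foldl
            (fun (st : Int × List (List Char)) j =>
              (st.1 + 1,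
               st.2 ++ ["DefRegion(".toList ++ PySem.Int.toChars (st.1 + 1) ++
                        ", Cuboid(GridSize, GridSize, GridSize*3)".toList ++ ".transl(".toList ++
                        sx ++ "Translate*".toList ++ PySem.Int.toChars (1 + 2*i) ++
                        ", ".toList ++ sy ++ "Translate*".toList ++ PySem.Int.toChars (1 + 2*j) ++
                        ", 0))\n".toList])) st) st) st) ((0 : Int), ([] : List (List Char)))
  String.ofList (PySem.Chars.join [] res.2)

-- ===== PRECONDITION & SPEC =====
def Spec_generate_gridspace (x : Int) (y : Int) (out : String) : Prop := out = generate_gridspace_alt x y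
instance (x : Int) (y : Int) (out : String) : Decidable (Spec_generate_gridspace x y out) := by unfold Spec_generate_gridspace; infer_instance

-- ===== CLAIM (what is proved, stated in full; the proofs are below) =====
def Claim_equal_generate_gridspace : Prop := ∀ (x : Int) (y : Int), Dom_generate_gridspace x y → Spec_generate_gridspace x y (generate_gridspace x y)

-- ===== LEMMAS AND PROOFS =====
def pvTr : List Char := "Translate".toList
def pvNtr : List Char := "-Translate".toList
def pvPre : List Char := ", Cuboid(GridSize, GridSize, GridSize*3).transl(".toList

def pvBody (sx sy : List Char) (i j : Int) : List Char :=
  pvPre ++ sx ++ "Translate*".toList ++ PySem.Int.toChars (1 + 2*i) ++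
  ", ".toList ++ sy ++ "Translate*".toList ++ PySem.Int.toChars (1 + 2*j) ++ ", 0))\n".toList

def pvBlock (x y : Int) (sx sy : List Char) : List (List Char) :=
  (PySem.List.pyRange 0 (PySem.Int.truncdiv x 2)).flatMap (fun i =>
    (PySem.List.pyRange 0 (PySem.Int.truncdiv y 2)).map (fun j => pvBody sx sy i j))

def pvPref (p : Int × List Char) : List Char :=
  "DefRegion(".toList ++ PySem.Int.toChars (p.1 + 1) ++ p.2

def pvAll (x y : Int) : List (List Char) :=
  pvBlock x y [] [] ++ (pvBlock x y ['-'] [] ++ (pvBlock x y [] ['-'] ++ pvBlock x y ['-'] ['-']))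

lemma pv_noT_isIn (cs : List Char) (h : 'T' ∉ cs) : PySem.Chars.isIn pvTr cs = false := by
  rw [← Bool.not_eq_true, PySem.Chars.isIn_iff_infix]
  intro hinf
  exact h (hinf.subset (by decide : 'T' ∈ pvTr))

lemma pv_noT_toChars (n : Int) (h : 0 ≤ n) : 'T' ∉ PySem.Int.toChars n := by
  unfold PySem.Int.toChars
  rw [if_neg (by omega)]
  intro hm
  have := Nat.isDigit_of_mem_toDigits (b := 10) (by norm_num) (by norm_num) hm
  simp at this

lemma pvRF_concat (ℓ rest new : List Char) (h : 'T' ∉ ℓ) :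
    pvReplaceFirst (ℓ ++ (pvTr ++ rest)) pvTr new = ℓ ++ (new ++ rest) := by
  induction ℓ with
  | nil =>
    simp only [List.nil_append]
    rw [show pvTr ++ rest = 'T' :: ("ranslate".toList ++ rest) by simp [pvTr]]
    rw [pvReplaceFirst]
    rw [if_pos]
    · simp [pvTr]
    · rw [List.isPrefixOf_iff_prefix]
      exact (show pvTr <+: 'T' :: ("ranslate".toList ++ rest) by
        simp [pvTr])
  | cons c ℓ' ih =>
    have hc : c ≠ 'T' := fun hcT => h (hcT ▸ List.mem_cons_self)
    have hℓ' : 'T' ∉ ℓ' := fun hm => h (List.mem_cons_of_mem _ hm)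
    rw [List.cons_append, pvReplaceFirst]
    rw [if_neg, ih hℓ', List.cons_append]
    rw [List.isPrefixOf_iff_prefix]
    intro hp
    exact hc ((List.cons_prefix_cons.mp (by simpa [pvTr] using hp)).1.symm)

lemma pvRL_skip (ℓ cs new : List Char) (h : PySem.Chars.isIn pvTr cs = true) :
    pvReplaceLast (ℓ ++ cs) pvTr new = ℓ ++ pvReplaceLast cs pvTr new := by
  induction ℓ with
  | nil => simp
  | cons c ℓ' ih =>
    rw [List.cons_append, pvReplaceLast, if_pos, ih, List.cons_append]
    rw [PySem.Chars.isIn_iff_infix] at h ⊢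
    exact h.trans (List.suffix_append ℓ' cs).isInfix

lemma pvRL_here (rest new : List Char) (h : 'T' ∉ rest) :
    pvReplaceLast (pvTr ++ rest) pvTr new = new ++ rest := by
  rw [show pvTr ++ rest = 'T' :: ("ranslate".toList ++ rest) by simp [pvTr]]
  rw [pvReplaceLast]
  rw [if_neg, if_pos]
  · simp [pvTr]
  · rw [List.isPrefixOf_iff_prefix]
    exact (show pvTr <+: 'T' :: ("ranslate".toList ++ rest) by
      simp [pvTr])
  · rw [pv_noT_isIn]
    · simp
    · intro hm
      rcases List.mem_append.mp hm with h1 | h2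
      · revert h1; decide
      · exact h h2

lemma pv_f1_body (i j : Int) :
    pvReplaceFirst (pvBody [] [] i j) pvTr pvNtr = pvBody ['-'] [] i j := by
  have e1 : "Translate*".toList = pvTr ++ ['*'] := by decide
  have hform : pvBody [] [] i j =
      pvPre ++ (pvTr ++ (['*'] ++ (PySem.Int.toChars (1 + 2*i) ++ (", ".toList ++
        ("Translate*".toList ++ (PySem.Int.toChars (1 + 2*j) ++ ", 0))\n".toList)))))) := by
    simp [pvBody, e1, List.append_assoc]
  rw [hform, pvRF_concat _ _ _ (by decide)]
  simp [pvBody, e1, show pvNtr = ['-'] ++ pvTr by decide, List.append_assoc]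

lemma pv_f2_body (sx : List Char) (i j : Int) (hj : 0 ≤ j) :
    pvReplaceLast (pvBody sx [] i j) pvTr pvNtr = pvBody sx ['-'] i j := by
  have e1 : "Translate*".toList = pvTr ++ ['*'] := by decide
  have hform : pvBody sx [] i j =
      (pvPre ++ sx ++ pvTr ++ ['*'] ++ PySem.Int.toChars (1 + 2*i) ++ ", ".toList) ++
        (pvTr ++ (['*'] ++ (PySem.Int.toChars (1 + 2*j) ++ ", 0))\n".toList))) := by
    simp [pvBody, e1, List.append_assoc]
  rw [hform, pvRL_skip, pvRL_here]
  · simp [pvBody, e1, show pvNtr = ['-'] ++ pvTr by decide, List.append_assoc]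
  · intro hm
    rcases List.mem_append.mp hm with h1 | h2
    · revert h1; decide
    · rcases List.mem_append.mp h2 with h3 | h4
      · exact pv_noT_toChars _ (by omega) h3
      · revert h4; decide
  · rw [PySem.Chars.isIn_iff_infix]
    exact (List.prefix_append pvTr _).isInfix

lemma pv_map_f1 (x y : Int) :
    (pvBlock x y [] []).map (fun s => pvReplaceFirst s pvTr pvNtr) = pvBlock x y ['-'] [] := by
  simp only [pvBlock, List.map_flatMap, List.map_map]
  exact List.flatMap_congr (fun i _ => List.map_congr_left (fun j _ => pv_f1_body i j))

lemma pv_map_f2 (x y : Int) (sx : List Char) :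
    (pvBlock x y sx []).map (fun s => pvReplaceLast s pvTr pvNtr) = pvBlock x y sx ['-'] := by
  simp only [pvBlock, List.map_flatMap, List.map_map]
  refine List.flatMap_congr (fun i _ => List.map_congr_left (fun j hj => ?_))
  exact pv_f2_body sx i j (PySem.List.mem_pyRange_one.mp hj).1

lemma pvA_norm (x y : Int) :
    generate_gridspace x y = String.ofList (PySem.Chars.join [] ((PySem.List.enumerate (pvAll x y) 0).map pvPref)) := by
  have c1 : pvPre = ", Cuboid(GridSize, GridSize, GridSize*3)".toList ++ ".transl(".toList := by decide
  have c2 : ", Translate*".toList = ", ".toList ++ "Translate*".toList := by decide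
  have hitem : ∀ i j : Int,
      ", Cuboid(GridSize, GridSize, GridSize*3)".toList ++ ".transl(".toList ++
        "Translate*".toList ++ PySem.Int.toChars (1 + 2*i) ++
        ", Translate*".toList ++ PySem.Int.toChars (1 + 2*j) ++ ", 0))\n".toList
      = pvBody [] [] i j := by
    intro i j
    simp [pvBody, c1, c2, List.append_assoc]
  simp only [generate_gridspace]
  simp only [PySem.List.foldl_append_singleton_eq_map, PySem.List.foldl_append_eq_flatMap,
    List.nil_append]
  simp only [hitem]
  rw [show "Translate".toList = pvTr from rfl, show "-Translate".toList = pvNtr from rfl]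
  rw [show ((PySem.List.pyRange 0 (PySem.Int.truncdiv x 2)).flatMap fun i =>
        (PySem.List.pyRange 0 (PySem.Int.truncdiv y 2)).map fun j => pvBody [] [] i j)
      = pvBlock x y [] [] from rfl]
  simp only [List.map_append, pv_map_f1, pv_map_f2]
  rw [show pvBlock x y [] [] ++ pvBlock x y ['-'] [] ++ (pvBlock x y [] ['-'] ++ pvBlock x y ['-'] ['-'])
      = pvAll x y by simp [pvAll, List.append_assoc]]
  rfl

lemma pvFold1 (ry : List Int) (h : Int → List Char) (st : Int × List (List Char)) :
    ry.foldl (fun (st : Int × List (List Char)) j => (st.1 + 1, st.2 ++ [pvPref (st.1, h j)])) st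
      = (st.1 + (ry.map h).length, st.2 ++ (PySem.List.enumerate (ry.map h) st.1).map pvPref) := by
  induction ry generalizing st with
  | nil => simp [PySem.List.enumerate_nil]
  | cons r ry' ih =>
    rw [List.foldl_cons, ih, List.map_cons, PySem.List.enumerate_cons]
    simp [List.append_assoc]
    omega

lemma pvFold2 (rx ry : List Int) (g : Int → Int → List Char) (st : Int × List (List Char)) :
    rx.foldl (fun st i => ry.foldl
        (fun (st : Int × List (List Char)) j => (st.1 + 1, st.2 ++ [pvPref (st.1, g i j)])) st) st
      = (st.1 + (rx.flatMap fun i => ry.map (g i)).length,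
         st.2 ++ (PySem.List.enumerate (rx.flatMap fun i => ry.map (g i)) st.1).map pvPref) := by
  induction rx generalizing st with
  | nil => simp [PySem.List.enumerate_nil]
  | cons r rx' ih =>
    rw [List.foldl_cons, pvFold1, ih, List.flatMap_cons, PySem.List.enumerate_append]
    simp [List.append_assoc]
    omega

lemma pvB_norm (x y : Int) :
    generate_gridspace_alt x y = String.ofList (PySem.Chars.join [] ((PySem.List.enumerate (pvAll x y) 0).map pvPref)) := by
  have c1 : pvPre = ", Cuboid(GridSize, GridSize, GridSize*3)".toList ++ ".transl(".toList := by decide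
  have hitem : ∀ (sx sy : List Char) (i j n : Int),
      "DefRegion(".toList ++ PySem.Int.toChars (n + 1) ++
        ", Cuboid(GridSize, GridSize, GridSize*3)".toList ++ ".transl(".toList ++
        sx ++ "Translate*".toList ++ PySem.Int.toChars (1 + 2*i) ++
        ", ".toList ++ sy ++ "Translate*".toList ++ PySem.Int.toChars (1 + 2*j) ++
        ", 0))\n".toList
      = pvPref (n, pvBody sx sy i j) := by
    intro sx sy i j n
    simp [pvPref, pvBody, c1, List.append_assoc]
  simp only [generate_gridspace_alt]
  simp only [hitem]
  simp only [pvFold2]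
  simp only [List.foldl_cons, List.foldl_nil]
  simp [pvAll, pvBlock, PySem.List.enumerate_append, List.map_append, List.append_assoc,
    show "-".toList = ['-'] by decide]

-- ===== VERDICT (by name: the statement is the Claim_ definition above) =====
theorem generate_gridspace_spec : Claim_equal_generate_gridspace := by
  intro x y _
  unfold Spec_generate_gridspace
  rw [pvA_norm, pvB_norm]
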